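-- pv_equiv track=rewrite | github.com/jack12356/leetcode2021 | Nicco的中级算法python/e_8_SearchReverseInt.py | search_rv
-- ===== SOURCE A (Python) =====
-- def search_rv(nums):
--     st = 0
--     end = len(nums) -1
--     while st<end:
--         mid = st+ (end-st)//2
--         if nums[mid] > nums[mid+1]:
--             return mid
--         if nums[mid] >= nums[len(nums) - 1]:
--             st = mid + 1
--         else:
--             end = mid
--     return st
-- ===== SOURCE B (Python) =====
-- def search_rv(nums):
--     if not nums:
--         return 0
--     last = nums[-1]
--
--     def go(seg, off):
--         m = len(seg)
--         if m == 1: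
--             return off
--         mid = (m - 1) // 2
--         if seg[mid] > seg[mid + 1]:
--             return off + mid
--         if seg[mid] >= last:
--             return go(seg[mid + 1:], off + mid + 1)
--         return go(seg[:mid + 1], off)
--
--     return go(nums, 0)
-- ===== Notes on version B (the rewrite author's own statement) =====
-- stated objective: alternative
-- what changed: A's in-place while loop over (st, end) index bounds is replaced by recursive divide-and-conquer on shrinking list slices carried with an offset, performing the same comparison sequence.
import Mathlib
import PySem

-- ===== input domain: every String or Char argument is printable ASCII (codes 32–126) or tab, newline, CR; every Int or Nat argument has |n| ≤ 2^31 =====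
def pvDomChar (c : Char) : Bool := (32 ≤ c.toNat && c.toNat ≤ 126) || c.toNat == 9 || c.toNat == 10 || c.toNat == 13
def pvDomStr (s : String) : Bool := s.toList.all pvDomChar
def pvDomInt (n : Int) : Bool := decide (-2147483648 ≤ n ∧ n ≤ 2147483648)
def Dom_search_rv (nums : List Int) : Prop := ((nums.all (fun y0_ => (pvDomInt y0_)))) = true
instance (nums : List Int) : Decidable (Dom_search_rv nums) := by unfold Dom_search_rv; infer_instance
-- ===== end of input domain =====

-- B re-implements A's index-based binary-search loop as divide and conquer on shrinking
-- SLICES of the list (carrying an offset), keeping the same comparison sequence (objective: alternative).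

-- ===== PORT A =====
-- A's while loop with state (st, end); 'mid' is written out at each use. The indexed accesses
-- are always in range when the loop body runs (0 ≤ st < en ≤ len-1), so the .getD 0 default is
-- never used.
def searchLoop (nums : List Int) (st en : Int) : Int :=
  if _h : st < en then
    if (PySem.List.pyGet? nums (st + PySem.Int.floordiv (en - st) 2)).getD 0 >
        (PySem.List.pyGet? nums (st + PySem.Int.floordiv (en - st) 2 + 1)).getD 0 then
      st + PySem.Int.floordiv (en - st) 2
    else if (PySem.List.pyGet? nums (st + PySem.Int.floordiv (en - st) 2)).getD 0 ≥
        (PySem.List.pyGet? nums ((nums.length : Int) - 1)).getD 0 then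
      searchLoop nums (st + PySem.Int.floordiv (en - st) 2 + 1) en
    else
      searchLoop nums st (st + PySem.Int.floordiv (en - st) 2)
  else st
termination_by (en - st).toNat
decreasing_by
  all_goals rw [PySem.Int.floordiv_eq_ediv_of_pos (by omega : (0:Int) < 2)]; omega

def search_rv (nums : List Int) : Int :=
  searchLoop nums 0 ((nums.length : Int) - 1)

-- ===== PORT B =====
-- Source B's helper go(seg, off): seg is a contiguous window of nums, off its start index; 'mid'
-- is written out at each use. Source B tests 'm == 1'; seg is never empty in any reachable call,
-- so the guard is written 'm ≤ 1' only to totalize. seg[i] with 0 ≤ i < m is ported as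
-- seg.getD i 0 (exact there); seg[mid+1:] / seg[:mid+1] with 0 ≤ mid+1 ≤ m are drop / take
-- (exact there).
def goB (last : Int) (seg : List Int) (off : Int) : Int :=
  if seg.length ≤ 1 then off
  else
    if seg.getD ((seg.length - 1) / 2) 0 > seg.getD ((seg.length - 1) / 2 + 1) 0 then
      off + ((seg.length - 1) / 2 : Nat)
    else if seg.getD ((seg.length - 1) / 2) 0 ≥ last then
      goB last (seg.drop ((seg.length - 1) / 2 + 1)) (off + ((seg.length - 1) / 2 : Nat) + 1)
    else
      goB last (seg.take ((seg.length - 1) / 2 + 1)) off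
termination_by seg.length
decreasing_by all_goals simp; omega

def search_rv_alt (nums : List Int) : Int :=
  if nums = [] then 0
  else goB ((PySem.List.pyGet? nums (-1)).getD 0) nums 0

-- ===== PRECONDITION & SPEC =====
def Spec_search_rv (nums : List Int) (out : Int) : Prop := out = search_rv_alt nums
instance (nums : List Int) (out : Int) : Decidable (Spec_search_rv nums out) := by unfold Spec_search_rv; infer_instance

-- ===== CLAIM (what is proved, stated in full; the proofs are below) =====
def Claim_equal_search_rv : Prop := ∀ (nums : List Int), Dom_search_rv nums → Spec_search_rv nums (search_rv nums)

-- ===== LEMMAS AND PROOFS =====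

lemma loop_eq_go (k : Nat) (nums : List Int) (last : Int) (lo hi : Nat)
    (hk : hi - lo ≤ k) (hhi : hi < nums.length)
    (hlast : last = (PySem.List.pyGet? nums ((nums.length : Int) - 1)).getD 0) :
    searchLoop nums lo hi = goB last ((nums.drop lo).take (hi + 1 - lo)) lo := by
  induction k generalizing lo hi with
  | zero =>
    rw [searchLoop, goB]
    rw [dif_neg (by omega : ¬ ((lo:Int) < (hi:Int))),
        if_pos (by simp [List.length_take, List.length_drop]; omega)]
  | succ k ih =>
    by_cases hlt : lo < hi
    · set seg := (nums.drop lo).take (hi + 1 - lo) with hseg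
      have hseglen : seg.length = hi + 1 - lo := by
        simp [hseg, List.length_take, List.length_drop]; omega
      set midr := (hi - lo) / 2 with hmidr
      have hmidlt : midr < hi - lo := by omega
      have hget : ∀ i, i ≤ hi - lo → seg.getD i 0 = (nums[lo + i]?).getD 0 := by
        intro i hile
        have h1 : i < seg.length := by omega
        have h2 : lo + i < nums.length := by omega
        rw [List.getD_eq_getElem?_getD, List.getElem?_eq_getElem h1,
            List.getElem?_eq_getElem h2]
        congr 1
        simp [hseg, List.getElem_take, List.getElem_drop]
      rw [searchLoop, goB]
      rw [dif_pos (by exact_mod_cast hlt : (lo:Int) < (hi:Int))]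
      rw [if_neg (by omega : ¬ seg.length ≤ 1)]
      rw [← hlast]
      have e1 : ((lo:Int) + PySem.Int.floordiv ((hi:Int) - lo) 2) = ((lo + midr : Nat) : Int) := by
        rw [PySem.Int.floordiv_eq_ediv_of_pos (by omega : (0:Int) < 2)]; omega
      rw [e1]
      have e2 : ((lo + midr : Nat) : Int) + 1 = ((lo + midr + 1 : Nat) : Int) := by push_cast; ring
      rw [e2]
      simp only [PySem.List.pyGet?_natCast]
      have e3 : (seg.length - 1) / 2 = midr := by omega
      rw [e3]
      rw [hget midr (by omega), hget (midr + 1) (by omega),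
          show lo + (midr + 1) = lo + midr + 1 by omega]
      have hdropeq : seg.drop (midr + 1)
          = (nums.drop (lo + midr + 1)).take (hi + 1 - (lo + midr + 1)) := by
        rw [hseg, List.drop_take, List.drop_drop]
        congr 1; omega
      have htakeeq : seg.take (midr + 1)
          = (nums.drop lo).take ((lo + midr) + 1 - lo) := by
        rw [hseg, List.take_take]
        congr 1; omega
      split_ifs with h1 h2
      · push_cast; ring
      · rw [hdropeq,
            show ((lo:Int) + (midr:Int) + 1) = ((lo + midr + 1 : Nat) : Int) by push_cast; ring]
        exact ih (lo + midr + 1) hi (by omega) hhi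
      · rw [htakeeq]
        exact ih lo (lo + midr) (by omega) (by omega)
    · rw [searchLoop, goB]
      rw [dif_neg (by omega : ¬ ((lo:Int) < (hi:Int))),
          if_pos (by simp [List.length_take, List.length_drop]; omega)]

-- ===== VERDICT (by name: the statement is the Claim_ definition above) =====
theorem search_rv_spec : Claim_equal_search_rv := by
  intro nums _
  unfold Spec_search_rv search_rv search_rv_alt
  cases nums with
  | nil => rw [searchLoop]; simp
  | cons x xs =>
    rw [if_neg (by simp)]
    have hlen : (((x :: xs).length : Nat) : Int) - 1 = (((x :: xs).length - 1 : Nat) : Int) := by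
      simp
    have hlast : ((PySem.List.pyGet? (x :: xs) (-1)).getD 0)
        = (PySem.List.pyGet? (x :: xs) (((x :: xs).length : Nat) - 1 : Int)).getD 0 := by
      rw [PySem.List.pyGet?_neg_one, hlen, PySem.List.pyGet?_natCast,
          List.getLast?_eq_getElem?]
    rw [hlen, show (0 : Int) = ((0 : Nat) : Int) by simp]
    rw [loop_eq_go ((x :: xs).length - 1) (x :: xs) _ 0 ((x :: xs).length - 1)
        le_rfl (by simp) hlast]
    congr 1
    rw [List.drop_zero, List.take_of_length_le (by omega)]
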